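-- pv_equiv track=rewrite | github.com/Gh0stJJ/rag-resolucion | app/utils.py | _slice_by_tokens_words
-- ===== SOURCE A (Python) =====
-- from typing import List, Dict, Any, Iterable
--
-- def _slice_by_tokens_words(words: List[str], max_tokens: int) -> List[str]:
--     chunks= []
--     cur, cur_tokens = [], 0
--     for w in words:
--         t = 1 #aprox
--         if cur and cur_tokens + t > max_tokens:
--             chunks.append(" ".join(cur))
--             cur, cur_tokens = [], 0
--         cur.append(w)
--         cur_tokens += t
--     if cur:
--         chunks.append(" ".join(cur))
--     return chunks
-- ===== SOURCE B (Python) =====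
-- def _slice_by_tokens_words(words, max_tokens):
--     step = max(1, max_tokens)
--     return [" ".join(words[i:i + step]) for i in range(0, len(words), step)]
-- ===== Notes on version B (the rewrite author's own statement) =====
-- stated objective: simpler
-- what changed: Replaced the per-word accumulate-and-flush loop (running chunk list, current buffer, token counter) with a one-line stride-slicing comprehension: step = max(1, max_tokens) and join words[i:i+step] for i in range(0, len(words), step).
import Mathlib
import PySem

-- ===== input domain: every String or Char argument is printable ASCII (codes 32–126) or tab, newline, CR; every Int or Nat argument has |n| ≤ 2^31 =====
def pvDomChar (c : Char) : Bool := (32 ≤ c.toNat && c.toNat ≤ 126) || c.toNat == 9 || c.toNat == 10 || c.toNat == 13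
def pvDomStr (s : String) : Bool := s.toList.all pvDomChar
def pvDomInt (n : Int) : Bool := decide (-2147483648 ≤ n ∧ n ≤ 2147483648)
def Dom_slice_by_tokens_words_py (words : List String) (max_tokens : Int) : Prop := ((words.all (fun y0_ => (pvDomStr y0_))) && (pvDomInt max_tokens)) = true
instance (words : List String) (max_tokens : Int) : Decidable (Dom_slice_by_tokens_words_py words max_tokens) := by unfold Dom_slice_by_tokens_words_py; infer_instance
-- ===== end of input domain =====

-- B replaces A's accumulate-and-flush loop with stride-index slicing (step = max(1, max_tokens)); simpler, same result.


-- ===== PORT A =====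
-- the for-loop of A, step for step: state (chunks, cur, cur_tokens), flush when cur non-empty and cur_tokens + 1 > max_tokens
def pvALoop (mt : Int) : List String → List String → List String → Int → List String
  | [], chunks, cur, _ct =>
      if cur.isEmpty then chunks else chunks ++ [PySem.Str.join " " cur]
  | w :: rest, chunks, cur, ct =>
      if cur.isEmpty = false ∧ ct + 1 > mt then
        pvALoop mt rest (chunks ++ [PySem.Str.join " " cur]) [w] 1
      else
        pvALoop mt rest chunks (cur ++ [w]) (ct + 1)

def slice_by_tokens_words_py (words : List String) (max_tokens : Int) : List String :=
  pvALoop max_tokens words [] [] 0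

-- ===== PORT B =====
def slice_by_tokens_words_py_alt (words : List String) (max_tokens : Int) : List String :=
  let step := max 1 max_tokens
  (PySem.List.pyRange 0 (words.length : Int) step).map
    (fun i => PySem.Str.join " " (PySem.List.slice words (some i) (some (i + step))))

-- ===== PRECONDITION & SPEC =====
def Spec_slice_by_tokens_words_py (words : List String) (max_tokens : Int) (out : List String) : Prop := out = slice_by_tokens_words_py_alt words max_tokens
instance (words : List String) (max_tokens : Int) (out : List String) : Decidable (Spec_slice_by_tokens_words_py words max_tokens out) := by unfold Spec_slice_by_tokens_words_py; infer_instance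

-- ===== CLAIM (what is proved, stated in full; the proofs are below) =====
def Claim_equal_slice_by_tokens_words_py : Prop := ∀ (words : List String) (max_tokens : Int), Dom_slice_by_tokens_words_py words max_tokens → Spec_slice_by_tokens_words_py words max_tokens (slice_by_tokens_words_py words max_tokens)

-- ===== LEMMAS AND PROOFS =====

-- the common reference value: the words grouped into blocks of s (s ≥ 1)
def pvGroups (s : Nat) : List String → List (List String)
  | [] => []
  | w :: rest => (w :: rest.take (s - 1)) :: pvGroups s (rest.drop (s - 1))
termination_by l => l.length
decreasing_by simp

theorem pvGroups_nil (s : Nat) : pvGroups s [] = [] := by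
  rw [pvGroups.eq_def]

theorem pvGroups_cons (s : Nat) (w : String) (rest : List String) :
    pvGroups s (w :: rest) = (w :: rest.take (s - 1)) :: pvGroups s (rest.drop (s - 1)) := by
  rw [pvGroups.eq_def]

theorem pvGroups_short (s : Nat) (l : List String) (h : l.length ≤ s) :
    pvGroups s l = if l.isEmpty then [] else [l] := by
  cases l with
  | nil => rw [pvGroups_nil]; rfl
  | cons c cs =>
      have h1 : cs.length ≤ s - 1 := by simp at h; omega
      rw [pvGroups_cons]
      simp [List.take_of_length_le h1, List.drop_of_length_le h1, pvGroups_nil]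

theorem pvGroups_full (s : Nat) (cur l : List String) (hne : cur ≠ []) (hlen : cur.length = s) :
    pvGroups s (cur ++ l) = cur :: pvGroups s l := by
  cases cur with
  | nil => exact absurd rfl hne
  | cons c cs =>
      have h1 : cs.length = s - 1 := by simp at hlen; omega
      rw [List.cons_append, pvGroups_cons, ← h1, List.take_left, List.drop_left]

theorem pvRange_pos_eq_nil (a b s : Int) (h : b ≤ a) (hs : 0 < s) :
    PySem.List.pyRange a b s = [] := by
  rw [PySem.List.pyRange_of_pos a b hs]
  simp [not_lt.mpr h]

theorem pvRange_add_left (a b c s : Int) (hs : 0 < s) :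
    PySem.List.pyRange (a + c) (b + c) s = (PySem.List.pyRange a b s).map (· + c) := by
  rw [PySem.List.pyRange_of_pos _ _ hs, PySem.List.pyRange_of_pos _ _ hs, List.map_map]
  have h1 : b + c - (a + c) = b - a := by ring
  rw [h1]
  simp only [add_lt_add_iff_right]
  apply List.map_congr_left
  intro k _
  simp only [Function.comp_apply]
  ring

theorem pvRange_pos_cons (a b s : Int) (hab : a < b) (hs : 0 < s) :
    PySem.List.pyRange a b s = a :: PySem.List.pyRange (a + s) b s := by
  rw [PySem.List.pyRange_of_pos _ _ hs, PySem.List.pyRange_of_pos _ _ hs]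
  have hd0 : (0 : Int) ≤ b - a - 1 := by omega
  have hq0 : (0 : Int) ≤ (b - a - 1) / s := Int.ediv_nonneg hd0 (le_of_lt hs)
  have h1 : (b - a + s - 1) / s = (b - a - 1) / s + 1 := by
    have : b - a + s - 1 = (b - a - 1) + 1 * s := by ring
    rw [this, Int.add_mul_ediv_right _ _ (by omega : s ≠ 0)]
  have h2 : (if a < b then ((b - a + s - 1) / s).toNat else 0)
      = ((b - a - 1) / s).toNat + 1 := by
    rw [if_pos hab, h1]; omega
  have h3 : (if a + s < b then ((b - (a + s) + s - 1) / s).toNat else 0)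
      = ((b - a - 1) / s).toNat := by
    by_cases hc : a + s < b
    · rw [if_pos hc]
      have : b - (a + s) + s - 1 = b - a - 1 := by ring
      rw [this]
    · rw [if_neg hc]
      have hlt : b - a - 1 < s := by omega
      rw [Int.ediv_eq_zero_of_lt hd0 hlt]
      rfl
  rw [h2, h3, List.range_succ_eq_map, List.map_cons, List.map_map]
  congr 1
  · simp
  · apply List.map_congr_left
    intro k _
    simp only [Function.comp_apply]
    push_cast
    ring

theorem pvSlice_shift (words : List String) (i s : Int) (hi : 0 ≤ i) (hs : 0 < s) :
    PySem.List.slice words (some (i + s)) (some (i + s + s))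
      = PySem.List.slice (words.drop s.toNat) (some i) (some (i + s)) := by
  rw [PySem.List.slice_toNat _ (by omega) (by omega),
      PySem.List.slice_toNat _ hi (by omega)]
  rw [List.drop_drop]
  have h1 : (i + s + s).toNat - (i + s).toNat = s.toNat := by omega
  have h2 : (i + s).toNat - i.toNat = s.toNat := by omega
  have h3 : (i + s).toNat = i.toNat + s.toNat := by omega
  rw [h1, h2, h3, Nat.add_comm]

theorem pvB_groups (s : Int) (hs : 1 ≤ s) (words : List String) :
    (PySem.List.pyRange 0 (words.length : Int) s).map
      (fun i => PySem.Str.join " " (PySem.List.slice words (some i) (some (i + s))))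
    = (pvGroups s.toNat words).map (fun c => PySem.Str.join " " c) := by
  match words with
  | [] =>
      rw [pvRange_pos_eq_nil _ _ _ (by simp) (by omega)]
      simp [pvGroups_nil]
  | w :: rest =>
      have hlc : (w :: rest).length = rest.length + 1 := rfl
      have hn : (0 : Int) < ((w :: rest).length : Int) := by omega
      rw [pvRange_pos_cons _ _ _ hn (by omega), List.map_cons]
      -- head
      have hhead : PySem.List.slice (w :: rest) (some 0) (some (0 + s))
          = w :: rest.take (s.toNat - 1) := by
        rw [PySem.List.slice_toNat _ (le_refl 0) (by omega)]
        obtain ⟨k, hk⟩ : ∃ k, (0 + s).toNat - (0 : Int).toNat = k + 1 := ⟨s.toNat - 1, by omega⟩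
        rw [hk]
        simp only [Int.toNat_zero, List.drop_zero, List.take_succ_cons]
        rw [show k = s.toNat - 1 by omega]
      -- shift the tail range down by s
      have htl : PySem.List.pyRange (0 + s) ((w :: rest).length : Int) s
          = (PySem.List.pyRange 0 (((w :: rest).length : Int) - s) s).map (· + s) := by
        have h0 : ((w :: rest).length : Int) = (((w :: rest).length : Int) - s) + s := by ring
        rw [h0, ← pvRange_add_left 0 _ s s (by omega)]
        ring_nf
      rw [htl, List.map_map]
      have hdrop : (w :: rest).drop s.toNat = rest.drop (s.toNat - 1) := by
        obtain ⟨k, hk⟩ : ∃ k, s.toNat = k + 1 := ⟨s.toNat - 1, by omega⟩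
        rw [hk, List.drop_succ_cons]
        simp
      have htailfun :
          (PySem.List.pyRange 0 (((w :: rest).length : Int) - s) s).map
            ((fun i => PySem.Str.join " " (PySem.List.slice (w :: rest) (some i) (some (i + s)))) ∘ (· + s))
          = (PySem.List.pyRange 0 (((w :: rest).length : Int) - s) s).map
            (fun i => PySem.Str.join " " (PySem.List.slice (rest.drop (s.toNat - 1)) (some i) (some (i + s)))) := by
        apply List.map_congr_left
        intro i hi
        have hi0 : 0 ≤ i :=
          ((PySem.List.mem_pyRange_iff_of_pos (show (0 : Int) < s by omega) i).mp hi).1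
        simp only [Function.comp_apply]
        rw [pvSlice_shift (w :: rest) i s hi0 (by omega), hdrop]
      rw [htailfun]
      by_cases hcase : ((w :: rest).length : Int) - s ≤ 0
      · -- everything fits in one chunk
        rw [pvRange_pos_eq_nil _ _ _ hcase (by omega), hhead]
        have hle2 : rest.length ≤ s.toNat - 1 := by omega
        rw [pvGroups_short s.toNat _ (by omega)]
        simp [List.take_of_length_le hle2]
      · have hlen : ((rest.drop (s.toNat - 1)).length : Int) = ((w :: rest).length : Int) - s := by
          rw [List.length_drop]
          omega
        rw [← hlen, pvB_groups s hs (rest.drop (s.toNat - 1)), hhead, pvGroups_cons]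
        simp
termination_by words.length
decreasing_by simp

theorem pvA_loop (mt : Int) (s : Nat) (hs : (s : Int) = max 1 mt) :
    ∀ (ws chunks cur : List String) (ct : Int), ct = (cur.length : Int) → cur.length ≤ s →
      pvALoop mt ws chunks cur ct
        = chunks ++ (pvGroups s (cur ++ ws)).map (fun c => PySem.Str.join " " c) := by
  intro ws
  induction ws with
  | nil =>
      intro chunks cur ct hct hle
      rw [List.append_nil]
      rw [pvGroups_short s cur hle]
      cases cur with
      | nil => simp [pvALoop]
      | cons c cs => simp [pvALoop]
  | cons w rest ih =>
      intro chunks cur ct hct hle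
      simp only [pvALoop]
      by_cases hcond : cur.isEmpty = false ∧ ct + 1 > mt
      · rw [if_pos hcond]
        have hne : cur ≠ [] := by
          intro h; subst h; simp at hcond
        have hcl : cur.length = s := by
          have h1 : 1 ≤ cur.length := List.length_pos_iff.mpr hne
          have := hcond.2
          omega
        rw [ih (chunks ++ [PySem.Str.join " " cur]) [w] 1 (by simp)
              (by simp only [List.length_cons, List.length_nil]; omega)]
        rw [pvGroups_full s cur (w :: rest) hne hcl]
        simp
      · rw [if_neg hcond]
        have hle' : (cur ++ [w]).length ≤ s := by
          by_cases hcur : cur.isEmpty = false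
          · have h2 : ¬ (ct + 1 > mt) := by
              intro h; exact hcond ⟨hcur, h⟩
            simp only [List.length_append, List.length_cons, List.length_nil]
            omega
          · have : cur = [] := by
              cases cur with
              | nil => rfl
              | cons c cs => simp at hcur
            subst this
            simp only [List.nil_append, List.length_cons, List.length_nil]
            omega
        rw [ih chunks (cur ++ [w]) (ct + 1) (by simp; omega) hle']
        rw [List.append_assoc]
        simp

-- ===== VERDICT (by name: the statement is the Claim_ definition above) =====
theorem slice_by_tokens_words_py_spec : Claim_equal_slice_by_tokens_words_py := by
  intro words mt _
  unfold Spec_slice_by_tokens_words_py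
  unfold slice_by_tokens_words_py slice_by_tokens_words_py_alt
  have hs1 : (1 : Int) ≤ max 1 mt := le_max_left 1 mt
  have hA := pvA_loop mt (max 1 mt).toNat (by omega) words [] [] 0 (by simp) (by simp)
  simp only [List.nil_append] at hA
  rw [hA, pvB_groups (max 1 mt) hs1 words]
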